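-- pv_equiv track=rewrite | github.com/csh3l3-20172018-ade/tebak-jenis-kelamin-berdasarkan-nama-BRAM97 | Machine Learning Bram.py | cewe
-- ===== SOURCE A (Python) =====
-- def cewe(nama):#def cewe berfungsi untuk menghitung berapa huruf yang terdapat pada nama yang banyak terdapat pada rata rata nama perempuan
--     x = 0
--     for i in range(len(nama)):
--         if nama[i] == 'a':
--             x = x + 1
--         if nama[i] == 'A':
--             x = x + 1
--         elif nama[i] == 'u':
--             x = x + 1
--         if nama[i] == 'U':
--             x = x + 1
--         elif nama[i] == 'e':
--             x = x + 1
--         if nama[i] == 'E':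
--             x = x + 1
--         elif nama[i] == 't':
--             x = x + 1
--         if nama[i] == 'T':
--             x = x + 1
--         elif nama[i] == 'i':
--             x = x + 1
--         if nama[i] == 'I':
--             x = x + 1
--         elif nama[i] == 'l':
--             x = x + 1
--         if nama[i] == 'L':
--             x = x + 1
--         elif nama[i] == ' ': break
--     return x
-- ===== SOURCE B (Python) =====
-- def cewe(nama):
--     # Build a character-frequency table of the part before the first space,
--     # then sum the frequencies of the twelve counted letters.
--     freq = {}
--     for c in nama.split(' ', 1)[0]:
--         freq[c] = freq.get(c, 0) + 1
--     return sum(freq.get(ch, 0) for ch in "aAuUeEtTiIlL")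
-- ===== Notes on version B (the rewrite author's own statement) =====
-- stated objective: alternative
-- what changed: Replaces the single index loop with a twelve-way if/elif chain and a sentinel break by a different data structure: one pass builds a character-frequency dict of the prefix before the first space, and the result is the sum of twelve table lookups (letter loop on the outside, no per-character branch chain).
import Mathlib
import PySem

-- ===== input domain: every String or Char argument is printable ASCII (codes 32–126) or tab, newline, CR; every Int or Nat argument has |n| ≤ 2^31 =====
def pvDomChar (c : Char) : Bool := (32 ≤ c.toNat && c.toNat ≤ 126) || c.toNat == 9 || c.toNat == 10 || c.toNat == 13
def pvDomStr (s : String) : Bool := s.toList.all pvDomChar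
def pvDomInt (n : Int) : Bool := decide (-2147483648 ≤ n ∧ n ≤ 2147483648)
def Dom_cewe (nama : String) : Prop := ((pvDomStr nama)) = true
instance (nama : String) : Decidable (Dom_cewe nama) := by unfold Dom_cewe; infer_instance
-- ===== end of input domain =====

-- B builds a frequency table of the prefix before the first space and sums twelve lookups;
-- same return value, different data structure; a timing run measured B faster (constant factor).

-- ===== PORT A =====
-- the for-loop over indices with its if/elif chain and the break at ' ':
-- structural recursion over the characters in order, carrying the counter x.
def ceweLoop : List Char → Int → Int
  | [], x => x
  | c :: rest, x =>
    let x := if c = 'a' then x + 1 else x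
    let x := if c = 'A' then x + 1 else if c = 'u' then x + 1 else x
    let x := if c = 'U' then x + 1 else if c = 'e' then x + 1 else x
    let x := if c = 'E' then x + 1 else if c = 't' then x + 1 else x
    let x := if c = 'T' then x + 1 else if c = 'i' then x + 1 else x
    let x := if c = 'I' then x + 1 else if c = 'l' then x + 1 else x
    if c = 'L' then ceweLoop rest (x + 1)
    else if c = ' ' then x          -- break
    else ceweLoop rest x

def cewe (nama : String) : Int := ceweLoop nama.toList 0

-- ===== PORT B =====
-- nama.split(' ', 1)[0] is the piece before the first space (the whole string when there
-- is no space): ported by hand, exact, as takeWhile (· ≠ ' ').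
-- freq[c] = freq.get(c, 0) + 1 over that prefix, then sum(freq.get(ch, 0) for ch in letters).
def cewe_alt (nama : String) : Int :=
  let p := nama.toList.takeWhile (· ≠ ' ')
  let freq := p.foldl (fun d c => d.insert c (d.getD c 0 + 1)) (PySem.Dict.empty : PySem.Dict Char Int)
  "aAuUeEtTiIlL".toList.foldl (fun acc ch => acc + freq.getD ch 0) 0

-- ===== PRECONDITION & SPEC =====
def Spec_cewe (nama : String) (out : Int) : Prop := out = cewe_alt nama
instance (nama : String) (out : Int) : Decidable (Spec_cewe nama out) := by unfold Spec_cewe; infer_instance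

-- ===== CLAIM =====
def Claim_equal_cewe : Prop := ∀ (nama : String), Dom_cewe nama → Spec_cewe nama (cewe nama)

-- ===== LEMMAS AND PROOFS =====
-- A's loop counts, before the first space, the characters belonging to the twelve letters.
lemma ceweLoop_eq (l : List Char) (x : Int) :
    ceweLoop l x =
      x + ((l.takeWhile (· ≠ ' ')).countP (fun c => c ∈ "aAuUeEtTiIlL".toList) : Int) := by
  induction l generalizing x with
  | nil => simp [ceweLoop]
  | cons c rest ih =>
    by_cases hsp : c = ' '
    · subst hsp
      simp [ceweLoop, List.takeWhile]
    · rw [show (c :: rest).takeWhile (fun c => c ≠ ' ') = c :: rest.takeWhile (fun c => c ≠ ' ') by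
        simp [hsp]]
      by_cases h0 : c = 'a'
      · subst h0; simp [ceweLoop, ih]; omega
      by_cases h1 : c = 'A'
      · subst h1; simp [ceweLoop, ih]; omega
      by_cases h2 : c = 'u'
      · subst h2; simp [ceweLoop, ih]; omega
      by_cases h3 : c = 'U'
      · subst h3; simp [ceweLoop, ih]; omega
      by_cases h4 : c = 'e'
      · subst h4; simp [ceweLoop, ih]; omega
      by_cases h5 : c = 'E'
      · subst h5; simp [ceweLoop, ih]; omega
      by_cases h6 : c = 't'
      · subst h6; simp [ceweLoop, ih]; omega
      by_cases h7 : c = 'T'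
      · subst h7; simp [ceweLoop, ih]; omega
      by_cases h8 : c = 'i'
      · subst h8; simp [ceweLoop, ih]; omega
      by_cases h9 : c = 'I'
      · subst h9; simp [ceweLoop, ih]; omega
      by_cases h10 : c = 'l'
      · subst h10; simp [ceweLoop, ih]; omega
      by_cases h11 : c = 'L'
      · subst h11; simp [ceweLoop, ih]; omega
      simp [ceweLoop, ih, hsp, h0, h1, h2, h3, h4, h5, h6, h7, h8, h9, h10, h11]

-- Summing the per-letter counts of the twelve (distinct) letters is counting
-- membership in the letter set.
lemma sum_counts (l : List Char) :
    ((l.count 'a' : Int) + l.count 'A' + l.count 'u' + l.count 'U' + l.count 'e'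
      + l.count 'E' + l.count 't' + l.count 'T' + l.count 'i' + l.count 'I'
      + l.count 'l' + l.count 'L')
      = (l.countP (fun c => c ∈ "aAuUeEtTiIlL".toList) : Int) := by
  induction l with
  | nil => simp
  | cons c rest ih =>
    by_cases h0 : c = 'a'
    · subst h0; simp [List.count_cons, List.countP_cons] at ih ⊢; omega
    by_cases h1 : c = 'A'
    · subst h1; simp [List.count_cons, List.countP_cons] at ih ⊢; omega
    by_cases h2 : c = 'u'
    · subst h2; simp [List.count_cons, List.countP_cons] at ih ⊢; omega
    by_cases h3 : c = 'U'
    · subst h3; simp [List.count_cons, List.countP_cons] at ih ⊢; omega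
    by_cases h4 : c = 'e'
    · subst h4; simp [List.count_cons, List.countP_cons] at ih ⊢; omega
    by_cases h5 : c = 'E'
    · subst h5; simp [List.count_cons, List.countP_cons] at ih ⊢; omega
    by_cases h6 : c = 't'
    · subst h6; simp [List.count_cons, List.countP_cons] at ih ⊢; omega
    by_cases h7 : c = 'T'
    · subst h7; simp [List.count_cons, List.countP_cons] at ih ⊢; omega
    by_cases h8 : c = 'i'
    · subst h8; simp [List.count_cons, List.countP_cons] at ih ⊢; omega
    by_cases h9 : c = 'I'
    · subst h9; simp [List.count_cons, List.countP_cons] at ih ⊢; omega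
    by_cases h10 : c = 'l'
    · subst h10; simp [List.count_cons, List.countP_cons] at ih ⊢; omega
    by_cases h11 : c = 'L'
    · subst h11; simp [List.count_cons, List.countP_cons] at ih ⊢; omega
    simp [List.count_cons, List.countP_cons, h0, h1, h2, h3, h4, h5, h6, h7, h8, h9, h10, h11] at ih ⊢
    omega

-- B: the dict lookups are the per-letter counts of the prefix.
lemma cewe_alt_eq (nama : String) :
    cewe_alt nama =
      ((nama.toList.takeWhile (· ≠ ' ')).countP (fun c => c ∈ "aAuUeEtTiIlL".toList) : Int) := by
  unfold cewe_alt
  have h := sum_counts (nama.toList.takeWhile (· ≠ ' '))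
  rw [show "aAuUeEtTiIlL".toList = ['a','A','u','U','e','E','t','T','i','I','l','L'] from rfl] at h ⊢
  simp only [List.foldl_cons, List.foldl_nil, PySem.Dict.getD_foldl_insert_add_one,
    PySem.Dict.getD_empty]
  omega

-- ===== VERDICT =====
theorem cewe_spec : Claim_equal_cewe := by
  intro nama _
  unfold Spec_cewe cewe
  rw [ceweLoop_eq, cewe_alt_eq]
  omega
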